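-- pv_equiv track=rewrite | github.com/Eilhwan/algorithms | oldOnes/algorithm/무제 폴더/line/arrA.py | solution
-- ===== SOURCE A (Python) =====
-- def solution(arr):
--     answer = 0
--     li = []
--     index = 0
--     while index != len(arr):
--         for i in range(index, len(arr)):
--             if len(arr[index: i+1]) >= 3:
--                 li.append(arr[index: i+1])
--         index += 1
--
--     for e in li:
--         peek = e.index(max(e))
--         left = peek - 1
--         right = peek + 1
--         isAList = True
--         if peek + 1 == len(e) or peek == 0:
--             isAList = False
--         if isAList:
--             for i in range(peek, len(e) - 1):
--                 if e[right] >= e[peek]: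
--                     isAList = False
--                 peek, right = right, right + 1
--
--             peek = e.index(max(e))
--             for i in range(peek, 0, -1):
--                 if e[left] >= e[peek]:
--                     isAList = False
--                 peek, left = left, left - 1
--         if isAList:
--             answer += 1
--     return answer
-- ===== SOURCE B (Python) =====
-- def solution(arr):
--     n = len(arr)
--     total = 0
--     for l in range(n):
--         state = 0  # 0 = start, 1 = rising, 2 = falling (valid mountain), 3 = dead
--         prev = arr[l]
--         for x in arr[l + 1:]:
--             if state == 0:
--                 state = 1 if x > prev else 3
--             elif state == 1:
--                 if x > prev:
--                     state = 1
--                 elif x < prev: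
--                     state = 2
--                 else:
--                     state = 3
--             elif state == 2:
--                 if x >= prev:
--                     state = 3
--             if state == 2:
--                 total += 1
--             prev = x
--     return total
-- ===== Notes on version B (the rewrite author's own statement) =====
-- stated objective: faster
-- what changed: A materializes every contiguous subarray of length >=3 and tests each one separately by locating its maximum with index(max(e)) and rescanning both sides; B never builds subarrays: for each start it extends the window one element at a time through a rise/fall state machine and counts the extensions that land in the accepting (rose-then-fell) state.
import Mathlib
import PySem

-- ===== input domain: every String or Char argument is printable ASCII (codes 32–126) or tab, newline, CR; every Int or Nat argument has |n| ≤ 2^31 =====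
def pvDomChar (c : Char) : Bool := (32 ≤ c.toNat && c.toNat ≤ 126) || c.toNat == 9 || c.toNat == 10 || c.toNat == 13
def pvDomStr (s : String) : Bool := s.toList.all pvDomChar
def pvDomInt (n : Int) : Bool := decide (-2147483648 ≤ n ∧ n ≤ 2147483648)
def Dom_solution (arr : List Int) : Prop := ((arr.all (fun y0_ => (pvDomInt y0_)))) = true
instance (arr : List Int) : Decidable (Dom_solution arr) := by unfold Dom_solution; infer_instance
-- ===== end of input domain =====

-- B replaces A's build-all-subarrays-then-test-each (argmax-based test per subarray) by an
-- incremental rise/fall state machine that extends each window one element at a time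
-- (objective: faster; a timing run measures the speed-up).


-- ===== PORT A =====
-- A-side helper: the body of A's second loop (argmax-based mountain test of one subarray)
def checkA (e : List Int) : Bool :=
  let peek : Int := (((PySem.List.index? e ((PySem.List.max? e (fun x => x)).getD 0)).getD 0 : Nat) : Int)
  let left : Int := peek - 1
  let right : Int := peek + 1
  let isAList : Bool := true
  let isAList : Bool := if peek + 1 = PySem.List.len e ∨ peek = 0 then false else isAList
  if isAList then
    let st1 := (PySem.List.pyRange peek (PySem.List.len e - 1) 1).foldl
      (fun (st : Bool × Int × Int) _ =>
        let b := if PySem.List.pyGetD e st.2.2 0 ≥ PySem.List.pyGetD e st.2.1 0 then false else st.1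
        (b, st.2.2, st.2.2 + 1)) (isAList, peek, right)
    let peek : Int := (((PySem.List.index? e ((PySem.List.max? e (fun x => x)).getD 0)).getD 0 : Nat) : Int)
    let st2 := (PySem.List.pyRange peek 0 (-1)).foldl
      (fun (st : Bool × Int × Int) _ =>
        let b := if PySem.List.pyGetD e st.2.2 0 ≥ PySem.List.pyGetD e st.2.1 0 then false else st.1
        (b, st.2.2, st.2.2 - 1)) (st1.1, peek, left)
    st2.1
  else isAList

-- the while loop advances index by 1 from 0 until len(arr): the loop over range(0, len(arr))
def solution (arr : List Int) : Int :=
  let li : List (List Int) :=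
    (PySem.List.pyRange 0 (PySem.List.len arr) 1).foldl (fun li index =>
      (PySem.List.pyRange index (PySem.List.len arr) 1).foldl (fun li i =>
        if 3 ≤ PySem.List.len (PySem.List.slice arr (some index) (some (i + 1))) then
          li ++ [PySem.List.slice arr (some index) (some (i + 1))]
        else li) li) []
  li.foldl (fun answer e => if checkA e then answer + 1 else answer) 0

-- ===== PORT B =====
def solution_alt (arr : List Int) : Int :=
  (PySem.List.pyRange 0 (PySem.List.len arr) 1).foldl (fun total l =>
    let prev := PySem.List.pyGetD arr l 0
    ((PySem.List.slice arr (some (l + 1)) none).foldl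
      (fun (st : Int × Int × Int) x =>
        let state := st.1
        let prev := st.2.1
        let total := st.2.2
        let state : Int :=
          if state = 0 then (if x > prev then 1 else 3)
          else if state = 1 then (if x > prev then 1 else if x < prev then 2 else 3)
          else if state = 2 then (if x ≥ prev then 3 else 2)
          else state
        let total := if state = 2 then total + 1 else total
        (state, x, total)) (0, prev, total)).2.2) 0

-- ===== PRECONDITION & SPEC =====
def Spec_solution (arr : List Int) (out : Int) : Prop := out = solution_alt arr
instance (arr : List Int) (out : Int) : Decidable (Spec_solution arr out) := by unfold Spec_solution; infer_instance

-- ===== CLAIM (what is proved, stated in full; the proofs are below) =====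
def Claim_equal_solution : Prop := ∀ (arr : List Int), Dom_solution arr → Spec_solution arr (solution arr)

-- ===== LEMMAS AND PROOFS =====

def Good (e : List Int) (p : Nat) : Prop :=
  0 < p ∧ p + 1 < e.length ∧
    List.IsChain (· < ·) (e.take (p + 1)) ∧ List.IsChain (· > ·) (e.drop p)
def IsM (e : List Int) : Prop := ∃ p : Nat, Good e p
def stepB (state prev x : Int) : Int :=
  if state = 0 then (if x > prev then 1 else 3)
  else if state = 1 then (if x > prev then 1 else if x < prev then 2 else 3)
  else if state = 2 then (if x ≥ prev then 3 else 2)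
  else state
def autoB (c : Int) (ys : List Int) : Int × Int :=
  ys.foldl (fun st x => (stepB st.1 st.2 x, x)) (0, c)
def mcount (c : Int) (ys : List Int) : Nat :=
  (List.range ys.length).countP (fun k => decide ((autoB c (ys.take (k + 1))).1 = 2))

theorem autoB_append (c : Int) (ys : List Int) (x : Int) :
    autoB c (ys ++ [x]) = (stepB (autoB c ys).1 (autoB c ys).2 x, x) := by
  simp [autoB]

theorem autoB_snd (c : Int) (ys : List Int) :
    (autoB c ys).2 = (c :: ys).getLast (by simp) := by
  induction ys using List.reverseRecOn with
  | nil => simp [autoB]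
  | append_singleton ys x ih => rw [autoB_append]; simp

theorem isM_append (u : List Int) (x : Int) (hu : u ≠ []) :
    IsM (u ++ [x]) ↔
      ((IsM u ∨ (2 ≤ u.length ∧ List.IsChain (· < ·) u)) ∧ u.getLast hu > x) := by
  constructor
  · rintro ⟨p, hp0, hplen, hinc, hdec⟩
    simp only [List.length_append, List.length_singleton] at hplen
    have hpu : p < u.length := by omega
    have htake : (u ++ [x]).take (p + 1) = u.take (p + 1) := by
      rw [List.take_append_of_le_length (by omega)]
    have hdrop : (u ++ [x]).drop p = u.drop p ++ [x] := by
      rw [List.drop_append_of_le_length (by omega)]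
    rw [htake] at hinc
    rw [hdrop, List.isChain_append] at hdec
    obtain ⟨hdec1, -, hlast⟩ := hdec
    have hdropne : u.drop p ≠ [] := by simp; omega
    have hlastu : (u.drop p).getLast hdropne = u.getLast hu := List.getLast_drop _
    have hgt : u.getLast hu > x := by
      have := hlast _ (List.getLast?_eq_some_getLast hdropne) x rfl
      rwa [hlastu] at this
    refine ⟨?_, hgt⟩
    by_cases hcase : p + 1 = u.length
    · right
      constructor; · omega
      · rw [List.take_of_length_le (by omega)] at hinc; exact hinc
    · left; exact ⟨p, hp0, by omega, hinc, hdec1⟩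
  · rintro ⟨h1 | ⟨hlen, hchain⟩, hgt⟩
    · obtain ⟨p, hp0, hplen, hinc, hdec⟩ := h1
      refine ⟨p, hp0, by simp; omega, ?_, ?_⟩
      · rw [List.take_append_of_le_length (by omega)]; exact hinc
      · rw [List.drop_append_of_le_length (by omega), List.isChain_append]
        refine ⟨hdec, by simp, ?_⟩
        intro a ha y hy
        have hdropne : u.drop p ≠ [] := by simp; omega
        rw [List.getLast?_eq_some_getLast hdropne] at ha
        simp at hy
        subst hy
        cases ha
        rw [List.getLast_drop]
        exact hgt
    · refine ⟨u.length - 1, by omega, by simp; omega, ?_, ?_⟩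
      · rw [List.take_append_of_le_length (by omega)]
        rw [show u.length - 1 + 1 = u.length by omega, List.take_length]
        exact hchain
      · rw [List.drop_append_of_le_length (by omega)]
        rw [List.drop_length_sub_one hu]
        simpa using hgt

theorem isM_length (e : List Int) (h : IsM e) : 3 ≤ e.length := by
  obtain ⟨p, hp0, hplen, -, -⟩ := h; omega

theorem not_isM_short (e : List Int) (h : e.length < 3) : ¬ IsM e :=
  fun hM => absurd (isM_length e hM) (by omega)

theorem stepB_zero (p x : Int) : stepB 0 p x = if x > p then 1 else 3 := by simp [stepB]
theorem stepB_one (p x : Int) : stepB 1 p x = if x > p then 1 else if x < p then 2 else 3 := by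
  norm_num [stepB]
theorem stepB_two (p x : Int) : stepB 2 p x = if x ≥ p then 3 else 2 := by norm_num [stepB]
theorem stepB_other (s p x : Int) (h0 : s ≠ 0) (h1 : s ≠ 1) (h2 : s ≠ 2) : stepB s p x = s := by
  simp [stepB, h0, h1, h2]

theorem autoB_spec (c : Int) (ys : List Int) :
    ((autoB c ys).1 = 0 ↔ ys = []) ∧
    ((autoB c ys).1 = 1 ↔ ys ≠ [] ∧ List.IsChain (· < ·) (c :: ys)) ∧
    ((autoB c ys).1 = 2 ↔ IsM (c :: ys)) := by
  induction ys using List.reverseRecOn with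
  | nil =>
    exact ⟨by simp [autoB], by simp [autoB], by
      simp only [autoB, List.foldl_nil]
      simp [not_isM_short [c] (by simp)]⟩
  | append_singleton ys x ih =>
    obtain ⟨ih0, ih1, ih2⟩ := ih
    have hp := autoB_snd c ys
    have hM : IsM (c :: (ys ++ [x])) ↔
        ((IsM (c :: ys) ∨ (2 ≤ (c :: ys).length ∧ List.IsChain (· < ·) (c :: ys))) ∧
          (c :: ys).getLast (by simp) > x) := by
      rw [show c :: (ys ++ [x]) = (c :: ys) ++ [x] by simp]
      exact isM_append _ x (by simp)
    have hC : List.IsChain (· < ·) (c :: (ys ++ [x])) ↔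
        (List.IsChain (· < ·) (c :: ys) ∧ (c :: ys).getLast (by simp) < x) := by
      rw [show c :: (ys ++ [x]) = (c :: ys) ++ [x] by simp, List.isChain_append]
      simp [List.getLast?_eq_some_getLast (l := c :: ys) (by simp)]
    rw [autoB_append, hp]
    by_cases h0 : (autoB c ys).1 = 0
    · have hys : ys = [] := ih0.mp h0
      subst hys
      have hg : (c :: ([] : List Int)).getLast (by simp) = c := rfl
      rw [hg] at hM hC
      rw [h0, stepB_zero]
      refine ⟨?_, ?_, ?_⟩ <;> dsimp only <;> split_ifs with hx
      · simp
      · simp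
      · rw [hC]; simp; simp at hx; omega
      · rw [hC]; simp; simp at hx; omega
      · rw [hM]; constructor
        · intro h; norm_num at h
        · rintro ⟨h1 | ⟨h1, -⟩, -⟩
          · exact absurd h1 (not_isM_short _ (by simp))
          · simp at h1
      · rw [hM]; constructor
        · intro h; norm_num at h
        · rintro ⟨h1 | ⟨h1, -⟩, -⟩
          · exact absurd h1 (not_isM_short _ (by simp))
          · simp at h1
    · have hys : ys ≠ [] := fun h => h0 (ih0.mpr h)
      by_cases h1 : (autoB c ys).1 = 1
      · have hch : List.IsChain (· < ·) (c :: ys) := (ih1.mp h1).2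
        rw [h1, stepB_one]
        refine ⟨?_, ?_, ?_⟩ <;> dsimp only <;> split_ifs with hx hx'
        · simp
        · simp
        · simp
        · rw [hC]; simp [hch, hx]
        · rw [hC]; constructor
          · intro h; norm_num at h
          · rintro ⟨-, -, h3⟩; omega
        · rw [hC]; constructor
          · intro h; norm_num at h
          · rintro ⟨-, -, h3⟩; omega
        · rw [hM]; constructor
          · intro h; norm_num at h
          · rintro ⟨-, h3⟩; omega
        · rw [hM]; constructor
          · intro _
            refine ⟨Or.inr ⟨?_, hch⟩, hx'⟩
            cases ys with
            | nil => exact absurd rfl hys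
            | cons a t => simp
          · intro _; rfl
        · rw [hM]; constructor
          · intro h; norm_num at h
          · rintro ⟨-, h3⟩; omega
      · by_cases h2 : (autoB c ys).1 = 2
        · have hMys : IsM (c :: ys) := ih2.mp h2
          have hnch : ¬ List.IsChain (· < ·) (c :: ys) := fun h => by
            rw [ih1.mpr ⟨hys, h⟩] at h2; norm_num at h2
          rw [h2, stepB_two]
          refine ⟨?_, ?_, ?_⟩ <;> dsimp only <;> split_ifs with hx
          · simp
          · simp
          · rw [hC]; constructor
            · intro h; norm_num at h
            · rintro ⟨-, h3, -⟩; exact absurd h3 hnch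
          · rw [hC]; constructor
            · intro h; norm_num at h
            · rintro ⟨-, h3, -⟩; exact absurd h3 hnch
          · rw [hM]; constructor
            · intro h; norm_num at h
            · rintro ⟨-, h3⟩; omega
          · rw [hM]; constructor
            · intro _; exact ⟨Or.inl hMys, by omega⟩
            · intro _; rfl
        · have hnM : ¬ IsM (c :: ys) := fun h => h2 (ih2.mpr h)
          have hnch : ¬ List.IsChain (· < ·) (c :: ys) := fun h => h1 (ih1.mpr ⟨hys, h⟩)
          rw [stepB_other _ _ _ h0 h1 h2]
          refine ⟨?_, ?_, ?_⟩ <;> dsimp only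
          · constructor
            · intro h; exact absurd h h0
            · intro h; simp at h
          · rw [hC]; constructor
            · intro h; exact absurd h h1
            · rintro ⟨-, h3, -⟩; exact absurd h3 hnch
          · rw [hM]; constructor
            · intro h; exact absurd h h2
            · rintro ⟨h3 | ⟨-, h3⟩, -⟩
              · exact absurd h3 hnM
              · exact absurd h3 hnch

theorem good_strictmax (e : List Int) (p : Nat) (h : Good e p) :
    ∀ j, (hj : j < e.length) → j ≠ p → e[j] < e[p]'(Nat.lt_of_succ_lt h.2.1) := by
  obtain ⟨hp0, hplen, hinc, hdec⟩ := h
  intro j hj hne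
  rcases Nat.lt_or_ge j p with hlt | hge
  · have hpw := List.isChain_iff_pairwise.mp hinc
    rw [List.pairwise_iff_getElem] at hpw
    have := hpw j p (by simp; omega) (by simp; omega) hlt
    simpa using this
  · have hgt : p < j := by omega
    have hpw := List.isChain_iff_pairwise.mp hdec
    rw [List.pairwise_iff_getElem] at hpw
    have := hpw 0 (j - p) (by simp; omega) (by simp; omega) (by omega)
    simp only [List.getElem_drop] at this
    have h2 : e[p + 0]'(by omega) > e[p + (j - p)]'(by omega) := this
    simp only [Nat.add_zero] at h2
    have hj' : p + (j - p) = j := by omega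
    simp only [hj'] at h2
    exact h2

theorem good_argmax (e : List Int) (p : Nat) (h : Good e p) :
    (PySem.List.index? e ((PySem.List.max? e (fun x => x)).getD 0)).getD 0 = p := by
  have hpl : p < e.length := Nat.lt_of_succ_lt h.2.1
  have hne : e ≠ [] := by intro he; rw [he] at hpl; simp at hpl
  obtain ⟨m, hm⟩ : ∃ m, PySem.List.max? e (fun x => x) = some m := by
    rcases Option.eq_none_or_eq_some (PySem.List.max? e (fun x => x)) with h' | h'
    · exact absurd ((PySem.List.max?_eq_none_iff e (fun x => x)).mp h') hne
    · exact h'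
  have hmax : ∀ y ∈ e, y ≤ m := PySem.List.max?_isMax hm
  have hmem : m ∈ e := PySem.List.max?_mem hm
  have hme : m = e[p] := by
    obtain ⟨j, hj, hje⟩ := List.mem_iff_getElem.mp hmem
    by_cases hjp : j = p
    · subst hjp; exact hje.symm
    · have h1 : e[j] < e[p]'hpl := good_strictmax e p h j hj hjp
      have h2 : e[p]'hpl ≤ m := hmax _ (List.getElem_mem hpl)
      omega
  have hidx : PySem.List.index? e m = some p := by
    rw [PySem.List.index?_eq_some_iff]
    refine ⟨e.take p, e.drop (p + 1), ?_, ?_, ?_⟩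
    · rw [hme, List.getElem_cons_drop, List.take_append_drop]
    · exact List.length_take_of_le (by omega)
    · intro hmemtake
      obtain ⟨j, hj, hje⟩ := List.mem_take_iff_getElem.mp hmemtake
      have hjp : j ≠ p := by omega
      have := good_strictmax e p h j (by omega) hjp
      rw [hje, ← hme] at this
      have h2 : e[p]'hpl ≤ m := hmax _ (List.getElem_mem hpl)
      rw [← hme] at h2
      omega
  rw [hm]
  simp only [Option.getD_some]
  rw [hidx]
  rfl

theorem foldR (e : List Int) : ∀ (n : Nat) (a : Int) (b0 : Bool) (b : Int), (b - a).toNat = n →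
    ((PySem.List.pyRange a b 1).foldl
      (fun (st : Bool × Int × Int) _ =>
        (if PySem.List.pyGetD e st.2.2 0 ≥ PySem.List.pyGetD e st.2.1 0 then false else st.1,
          st.2.2, st.2.2 + 1)) (b0, a, a + 1)).1
    = (b0 && decide (∀ i : Int, a ≤ i → i < b → PySem.List.pyGetD e (i + 1) 0 < PySem.List.pyGetD e i 0)) := by
  intro n
  induction n with
  | zero =>
    intro a b0 b hn
    have hba : b ≤ a := by omega
    rw [PySem.List.pyRange_one_eq_nil hba]
    simp only [List.foldl_nil]
    have : (∀ i : Int, a ≤ i → i < b → PySem.List.pyGetD e (i + 1) 0 < PySem.List.pyGetD e i 0) := by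
      intro i h1 h2; omega
    simp [decide_eq_true this]
  | succ n ih =>
    intro a b0 b hn
    have hab : a < b := by omega
    rw [PySem.List.pyRange_one_cons hab]
    simp only [List.foldl_cons]
    rw [ih (a + 1) _ b (by omega)]
    by_cases hhead : PySem.List.pyGetD e (a + 1) 0 < PySem.List.pyGetD e a 0
    · rw [if_neg (by omega)]
      by_cases htail : ∀ i : Int, a + 1 ≤ i → i < b → PySem.List.pyGetD e (i + 1) 0 < PySem.List.pyGetD e i 0
      · have hfull : ∀ i : Int, a ≤ i → i < b → PySem.List.pyGetD e (i + 1) 0 < PySem.List.pyGetD e i 0 := by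
          intro i h1 h2
          rcases eq_or_lt_of_le h1 with rfl | h3
          · exact hhead
          · exact htail i (by omega) h2
        rw [decide_eq_true htail, decide_eq_true hfull]
      · have hnfull : ¬ ∀ i : Int, a ≤ i → i < b → PySem.List.pyGetD e (i + 1) 0 < PySem.List.pyGetD e i 0 := by
          intro hfull
          exact htail (fun i h1 h2 => hfull i (by omega) h2)
        rw [decide_eq_false htail, decide_eq_false hnfull]
    · rw [if_pos (by omega)]
      have hnfull : ¬ ∀ i : Int, a ≤ i → i < b → PySem.List.pyGetD e (i + 1) 0 < PySem.List.pyGetD e i 0 := by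
        intro hfull
        exact hhead (hfull a le_rfl hab)
      rw [decide_eq_false hnfull]
      simp

theorem foldL (e : List Int) : ∀ (n : Nat) (m : Int) (b0 : Bool), m.toNat = n →
    ((PySem.List.pyRange m 0 (-1)).foldl
      (fun (st : Bool × Int × Int) _ =>
        (if PySem.List.pyGetD e st.2.2 0 ≥ PySem.List.pyGetD e st.2.1 0 then false else st.1,
          st.2.2, st.2.2 - 1)) (b0, m, m - 1)).1
    = (b0 && decide (∀ i : Int, 1 ≤ i → i ≤ m → PySem.List.pyGetD e (i - 1) 0 < PySem.List.pyGetD e i 0)) := by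
  intro n
  induction n with
  | zero =>
    intro m b0 hn
    have hm : m ≤ 0 := by omega
    rw [PySem.List.pyRange_neg_one_eq_nil hm]
    simp only [List.foldl_nil]
    have : (∀ i : Int, 1 ≤ i → i ≤ m → PySem.List.pyGetD e (i - 1) 0 < PySem.List.pyGetD e i 0) := by
      intro i h1 h2; omega
    simp [decide_eq_true this]
  | succ n ih =>
    intro m b0 hn
    have hm : 0 < m := by omega
    rw [PySem.List.pyRange_neg_one_cons hm]
    simp only [List.foldl_cons]
    rw [ih (m - 1) _ (by omega)]
    by_cases hhead : PySem.List.pyGetD e (m - 1) 0 < PySem.List.pyGetD e m 0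
    · rw [if_neg (by omega)]
      by_cases htail : ∀ i : Int, 1 ≤ i → i ≤ m - 1 → PySem.List.pyGetD e (i - 1) 0 < PySem.List.pyGetD e i 0
      · have hfull : ∀ i : Int, 1 ≤ i → i ≤ m → PySem.List.pyGetD e (i - 1) 0 < PySem.List.pyGetD e i 0 := by
          intro i h1 h2
          rcases eq_or_lt_of_le h2 with rfl | h3
          · exact hhead
          · exact htail i h1 (by omega)
        rw [decide_eq_true htail, decide_eq_true hfull]
      · have hnfull : ¬ ∀ i : Int, 1 ≤ i → i ≤ m → PySem.List.pyGetD e (i - 1) 0 < PySem.List.pyGetD e i 0 := by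
          intro hfull
          exact htail (fun i h1 h2 => hfull i h1 (by omega))
        rw [decide_eq_false htail, decide_eq_false hnfull]
    · rw [if_pos (by omega)]
      have hnfull : ¬ ∀ i : Int, 1 ≤ i → i ≤ m → PySem.List.pyGetD e (i - 1) 0 < PySem.List.pyGetD e i 0 := by
        intro hfull
        exact hhead (hfull m (by omega) le_rfl)
      rw [decide_eq_false hnfull]
      simp

theorem argmax_lt_length (e : List Int) (hne : e ≠ []) :
    (PySem.List.index? e ((PySem.List.max? e (fun x => x)).getD 0)).getD 0 < e.length := by
  obtain ⟨m, hm⟩ : ∃ m, PySem.List.max? e (fun x => x) = some m := by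
    rcases Option.eq_none_or_eq_some (PySem.List.max? e (fun x => x)) with h' | h'
    · exact absurd ((PySem.List.max?_eq_none_iff e (fun x => x)).mp h') hne
    · exact h'
  have hmem : m ∈ e := PySem.List.max?_mem hm
  obtain ⟨k, hk⟩ : ∃ k, PySem.List.index? e m = some k :=
    Option.isSome_iff_exists.mp ((PySem.List.index?_isSome_iff e m).mpr hmem)
  obtain ⟨hkl, -, -⟩ := PySem.List.getElem_of_index?_eq_some hk
  rw [hm]
  simp only [Option.getD_some]
  rw [hk]
  simpa using hkl

theorem checkA_iff (e : List Int) : checkA e = true ↔ IsM e := by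
  unfold checkA
  dsimp only
  by_cases hg : (((((PySem.List.index? e ((PySem.List.max? e (fun x => x)).getD 0)).getD 0 : Nat) : Int)) + 1
      = PySem.List.len e ∨ ((((PySem.List.index? e ((PySem.List.max? e (fun x => x)).getD 0)).getD 0 : Nat) : Int)) = 0)
  · rw [if_pos hg]
    simp only [Bool.false_eq_true, if_false, false_iff]
    intro hM
    obtain ⟨q, hq⟩ := hM
    have hpq := good_argmax e q hq
    rw [hpq] at hg
    obtain ⟨hq0, hqlen, -, -⟩ := hq
    rw [PySem.List.len_eq] at hg
    rcases hg with h1 | h1 <;> omega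
  · rw [if_neg hg, if_pos rfl]
    set p : Nat := (PySem.List.index? e ((PySem.List.max? e (fun x => x)).getD 0)).getD 0 with hpdef
    have hp0 : p ≠ 0 := by
      intro h
      exact hg (Or.inr (by rw [h]; simp))
    have hne : e ≠ [] := by
      intro h
      apply hp0
      rw [hpdef, h]
      simp [PySem.List.index?, PySem.List.max?]
    have hpl : p < e.length := argmax_lt_length e hne
    have hp1 : p + 1 < e.length := by
      rcases Nat.lt_or_ge (p + 1) e.length with h | h
      · exact h
      · exfalso
        apply hg
        left
        rw [PySem.List.len_eq]
        omega
    rw [foldR e (PySem.List.len e - 1 - p).toNat p true (PySem.List.len e - 1) rfl]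
    rw [foldL e (p : Int).toNat p _ rfl]
    constructor
    · intro hb
      simp only [Bool.true_and, Bool.and_eq_true, decide_eq_true_eq] at hb
      obtain ⟨hC1, hC2⟩ := hb
      refine ⟨p, Nat.pos_of_ne_zero hp0, hp1, ?_, ?_⟩
      · rw [List.isChain_iff_getElem]
        intro k hk
        simp only [List.length_take] at hk
        have hk' : k + 1 ≤ p := by omega
        have := hC2 ((k : Int) + 1) (by omega) (by omega)
        rw [PySem.List.pyGetD_eq_getElem e (i := (k : Int) + 1 - 1) 0 (by omega) (by omega),
            PySem.List.pyGetD_eq_getElem e (i := (k : Int) + 1) 0 (by omega) (by omega)] at this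
        simp only [List.getElem_take]
        have h1 : ((k : Int) + 1 - 1).toNat = k := by omega
        have h2 : ((k : Int) + 1).toNat = k + 1 := by omega
        simp only [h1, h2] at this
        exact this
      · rw [List.isChain_iff_getElem]
        intro k hk
        simp only [List.length_drop] at hk
        have := hC1 ((p : Int) + k) (by omega) (by rw [PySem.List.len_eq]; omega)
        rw [PySem.List.pyGetD_eq_getElem e (i := (p : Int) + k + 1) 0 (by omega) (by omega),
            PySem.List.pyGetD_eq_getElem e (i := (p : Int) + k) 0 (by omega) (by omega)] at this
        simp only [List.getElem_drop]
        have h1 : ((p : Int) + k).toNat = p + k := by omega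
        have h2 : ((p : Int) + k + 1).toNat = p + (k + 1) := by omega
        simp only [h1, h2] at this
        exact this
    · intro hM
      obtain ⟨q, hq⟩ := hM
      have hpq : p = q := by rw [hpdef]; exact good_argmax e q hq
      subst hpq
      obtain ⟨-, -, hinc, hdec⟩ := hq
      rw [List.isChain_iff_getElem] at hinc hdec
      have hC1 : ∀ i : Int, (p : Int) ≤ i → i < PySem.List.len e - 1 →
          PySem.List.pyGetD e (i + 1) 0 < PySem.List.pyGetD e i 0 := by
        intro i h1 h2
        rw [PySem.List.len_eq] at h2
        have hk : (i.toNat - p) + 1 < (e.drop p).length := by simp; omega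
        have := hdec (i.toNat - p) hk
        simp only [List.getElem_drop] at this
        rw [PySem.List.pyGetD_eq_getElem e (i := i + 1) 0 (by omega) (by omega),
            PySem.List.pyGetD_eq_getElem e (i := i) 0 (by omega) (by omega)]
        have h3 : p + (i.toNat - p) = i.toNat := by omega
        have h4 : p + (i.toNat - p + 1) = (i + 1).toNat := by omega
        simp only [h4] at this
        simp only [h3] at this
        exact this
      have hC2 : ∀ i : Int, 1 ≤ i → i ≤ (p : Int) →
          PySem.List.pyGetD e (i - 1) 0 < PySem.List.pyGetD e i 0 := by
        intro i h1 h2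
        have hk : (i.toNat - 1) + 1 < (e.take (p + 1)).length := by simp; omega
        have := hinc (i.toNat - 1) hk
        simp only [List.getElem_take] at this
        rw [PySem.List.pyGetD_eq_getElem e (i := i - 1) 0 (by omega) (by omega),
            PySem.List.pyGetD_eq_getElem e (i := i) 0 (by omega) (by omega)]
        have h4 : i.toNat - 1 + 1 = i.toNat := by omega
        simp only [h4] at this
        have h3 : i.toNat - 1 = (i - 1).toNat := by omega
        simp only [h3] at this
        exact this
      rw [decide_eq_true hC1, decide_eq_true hC2]
      rfl

theorem mcount_append (c : Int) (ys : List Int) (x : Int) :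
    mcount c (ys ++ [x]) = mcount c ys + (if (autoB c (ys ++ [x])).1 = 2 then 1 else 0) := by
  unfold mcount
  simp only [List.length_append, List.length_singleton, List.range_succ, List.countP_append]
  congr 1
  · apply List.countP_congr
    intro k hk
    rw [List.mem_range] at hk
    rw [List.take_append_of_le_length (by omega)]
  · simp only [List.countP_singleton]
    rw [List.take_of_length_le (by simp)]
    simp only [decide_eq_true_eq]

theorem foldB (c t : Int) (ys : List Int) :
    (ys.foldl (fun (st : Int × Int × Int) x =>
        ((if st.1 = 0 then (if x > st.2.1 then 1 else 3)
          else if st.1 = 1 then (if x > st.2.1 then 1 else if x < st.2.1 then 2 else 3)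
          else if st.1 = 2 then (if x ≥ st.2.1 then 3 else 2)
          else st.1), x,
         (if (if st.1 = 0 then (if x > st.2.1 then 1 else 3)
          else if st.1 = 1 then (if x > st.2.1 then 1 else if x < st.2.1 then 2 else 3)
          else if st.1 = 2 then (if x ≥ st.2.1 then 3 else 2)
          else st.1) = 2 then st.2.2 + 1 else st.2.2))) (0, c, t))
    = ((autoB c ys).1, (autoB c ys).2, t + (mcount c ys : Int)) := by
  induction ys using List.reverseRecOn with
  | nil => simp [autoB, mcount]
  | append_singleton ys x ih =>
    rw [List.foldl_append, ih]
    simp only [List.foldl_cons, List.foldl_nil]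
    rw [autoB_append, mcount_append]
    have hs : (if (autoB c ys).1 = 0 then (if x > (autoB c ys).2 then 1 else 3)
          else if (autoB c ys).1 = 1 then (if x > (autoB c ys).2 then 1 else if x < (autoB c ys).2 then 2 else 3)
          else if (autoB c ys).1 = 2 then (if x ≥ (autoB c ys).2 then 3 else 2)
          else (autoB c ys).1) = stepB (autoB c ys).1 (autoB c ys).2 x := rfl
    rw [hs]
    have hstep : (autoB c (ys ++ [x])).1 = stepB (autoB c ys).1 (autoB c ys).2 x := by
      rw [autoB_append]
    refine Prod.ext rfl (Prod.ext rfl ?_)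
    simp only [← hstep]
    split_ifs with h
    · push_cast; ring
    · push_cast; ring

theorem checkA_false_short (e : List Int) (h : e.length < 3) : checkA e = false := by
  rcases Bool.eq_false_or_eq_true (checkA e) with h' | h'
  · exact absurd ((checkA_iff e).mp h') (not_isM_short e h)
  · exact h'

theorem count_checkA_eq_mcount (c : Int) (ys : List Int) :
    (List.range (ys.length + 1)).countP (fun k => checkA ((c :: ys).take (k + 1))) = mcount c ys := by
  rw [List.range_succ_eq_map]
  rw [List.countP_cons, List.countP_map]
  have h0 : checkA ((c :: ys).take (0 + 1)) = false := checkA_false_short _ (by simp)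
  rw [h0]
  simp only [Bool.false_eq_true, if_false, Nat.add_zero]
  unfold mcount
  apply List.countP_congr
  intro k hk
  simp only [Function.comp]
  have ht : (c :: ys).take (Nat.succ k + 1) = c :: ys.take (k + 1) := by
    rw [List.take_succ_cons]
  rw [ht]
  have h2 := (autoB_spec c (ys.take (k + 1))).2.2
  by_cases hMk : IsM (c :: ys.take (k + 1))
  · simp [(checkA_iff _).mpr hMk, h2.mpr hMk]
  · have hA : checkA (c :: ys.take (k + 1)) = false := by
      cases h' : checkA (c :: ys.take (k + 1))
      · rfl
      · exact absurd ((checkA_iff _).mp h') hMk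
    simp [hA, decide_eq_false (fun hh => hMk (h2.mp hh))]

theorem Acount (arr : List Int) (l : Nat) (hl : l < arr.length) :
    (((PySem.List.pyRange (l : Int) (PySem.List.len arr) 1).filter
        (fun i => decide (3 ≤ PySem.List.len (PySem.List.slice arr (some (l : Int)) (some (i + 1)))))).map
        (fun i => PySem.List.slice arr (some (l : Int)) (some (i + 1)))).countP checkA
    = (List.range (arr.length - l)).countP (fun k => checkA ((arr.drop l).take (k + 1))) := by
  rw [List.countP_map, List.countP_filter, PySem.List.len_eq, PySem.List.pyRange_one, List.countP_map]
  have hnl : (((arr.length : Int)) - (l : Int)).toNat = arr.length - l := by omega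
  rw [hnl]
  apply List.countP_congr
  intro k hk
  rw [List.mem_range] at hk
  have hk' : k < arr.length - l := by omega
  simp only [Function.comp]
  have hcast : (l : Int) + (k : Int) + 1 = (l : Int) + ((k + 1 : Nat) : Int) := by push_cast; ring
  have hsl : PySem.List.slice arr (some ((l : Int))) (some ((l : Int) + (k : Int) + 1))
      = (arr.drop l).take (k + 1) := by
    rw [hcast, PySem.List.slice_natCast_add]
  rw [hsl]
  have hlen : PySem.List.len ((arr.drop l).take (k + 1)) = ((k + 1 : Nat) : Int) := by
    rw [PySem.List.len_eq]
    congr 1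
    simp
    omega
  rw [hlen]
  by_cases h3 : 3 ≤ ((k + 1 : Nat) : Int)
  · simp
    intro _
    omega
  · rw [decide_eq_false h3]
    have hshort : checkA ((arr.drop l).take (k + 1)) = false := by
      apply checkA_false_short
      simp
      omega
    simp [hshort]

def sliceList (arr : List Int) (index : Int) : List (List Int) :=
  ((PySem.List.pyRange index (PySem.List.len arr) 1).filter
    (fun i => decide (3 ≤ PySem.List.len (PySem.List.slice arr (some index) (some (i + 1)))))).map
    (fun i => PySem.List.slice arr (some index) (some (i + 1)))

theorem solution_eq_alt (arr : List Int) : solution arr = solution_alt arr := by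
  unfold solution solution_alt
  dsimp only
  -- A side: the append loops build the concatenation of the per-start slice lists
  have h1 := PySem.List.foldl_congr_mem
    (l := PySem.List.pyRange 0 (PySem.List.len arr) 1)
    (init := ([] : List (List Int)))
    (f := fun li index => (PySem.List.pyRange index (PySem.List.len arr) 1).foldl
      (fun li i =>
        if 3 ≤ PySem.List.len (PySem.List.slice arr (some index) (some (i + 1))) then
          li ++ [PySem.List.slice arr (some index) (some (i + 1))]
        else li) li)
    (g := fun li index => li ++ sliceList arr index)
    (by
      intro acc x _
      dsimp only
      exact PySem.List.foldl_append_ite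
        (p := fun i => 3 ≤ PySem.List.len (PySem.List.slice arr (some x) (some (i + 1))))
        (fun i => PySem.List.slice arr (some x) (some (i + 1)))
        (PySem.List.pyRange x (PySem.List.len arr) 1) acc)
  rw [h1, PySem.List.foldl_append_eq_flatMap, PySem.List.foldl_if_add_one, List.nil_append,
      List.countP_flatMap]
  -- B side: each start contributes mcount of its window extensions
  have h2 := PySem.List.foldl_congr_mem
    (l := PySem.List.pyRange 0 (PySem.List.len arr) 1)
    (init := (0 : Int))
    (f := fun (total : Int) (l : Int) =>
      ((PySem.List.slice arr (some (l + 1)) none).foldl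
        (fun (st : Int × Int × Int) x =>
          ((if st.1 = 0 then (if x > st.2.1 then 1 else 3)
            else if st.1 = 1 then (if x > st.2.1 then 1 else if x < st.2.1 then 2 else 3)
            else if st.1 = 2 then (if x ≥ st.2.1 then 3 else 2)
            else st.1), x,
           (if (if st.1 = 0 then (if x > st.2.1 then 1 else 3)
            else if st.1 = 1 then (if x > st.2.1 then 1 else if x < st.2.1 then 2 else 3)
            else if st.1 = 2 then (if x ≥ st.2.1 then 3 else 2)
            else st.1) = 2 then st.2.2 + 1 else st.2.2)))
        (0, PySem.List.pyGetD arr l 0, total)).2.2)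
    (g := fun (total : Int) (l : Int) =>
      total + ((mcount (PySem.List.pyGetD arr l 0) (PySem.List.slice arr (some (l + 1)) none) : Nat) : Int))
    (by
      intro acc x _
      dsimp only
      rw [foldB])
  rw [h2, PySem.List.foldl_add]
  rw [Nat.cast_list_sum, List.map_map]
  congr 1
  congr 1
  apply List.map_congr_left
  intro l hl
  rw [PySem.List.mem_pyRange_one] at hl
  obtain ⟨hl0, hln⟩ := hl
  have hlN : l = ((l.toNat : Nat) : Int) := by omega
  have hlt : l.toNat < arr.length := by
    rw [PySem.List.len_eq] at hln
    omega
  simp only [Function.comp]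
  rw [hlN]
  have hG : sliceList arr ((l.toNat : Nat) : Int)
      = ((PySem.List.pyRange ((l.toNat : Nat) : Int) (PySem.List.len arr) 1).filter
          (fun i => decide (3 ≤ PySem.List.len (PySem.List.slice arr (some ((l.toNat : Nat) : Int)) (some (i + 1)))))).map
          (fun i => PySem.List.slice arr (some ((l.toNat : Nat) : Int)) (some (i + 1))) := rfl
  rw [hG, Acount arr l.toNat hlt]
  have hdrop : arr.drop l.toNat = arr[l.toNat] :: arr.drop (l.toNat + 1) :=
    List.drop_eq_getElem_cons hlt
  have hlen2 : arr.length - l.toNat = (arr.drop (l.toNat + 1)).length + 1 := by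
    simp only [List.length_drop]
    omega
  rw [hdrop, hlen2, count_checkA_eq_mcount]
  have hc : PySem.List.pyGetD arr ((l.toNat : Nat) : Int) 0 = arr[l.toNat] := by
    rw [PySem.List.pyGetD_natCast]
    simp [hlt]
  have hys : PySem.List.slice arr (some (((l.toNat : Nat) : Int) + 1)) none = arr.drop (l.toNat + 1) := by
    have hcast2 : ((l.toNat : Nat) : Int) + 1 = ((l.toNat + 1 : Nat) : Int) := by push_cast; ring
    rw [hcast2, PySem.List.slice_from_natCast]
  rw [hc, hys]

-- ===== VERDICT (by name: the statement is the Claim_ definition above) =====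
theorem solution_spec : Claim_equal_solution := by
  intro arr _
  unfold Spec_solution
  exact solution_eq_alt arr
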